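-- pv_equiv track=rewrite | github.com/ddoron9/demo | preprocess.py | json_reorder
-- ===== SOURCE A (Python) =====
-- def json_reorder(curdata):
--     gender_index = -1
--     intent_index = -1
--     tone_index = -1
--     for i, c in enumerate(curdata):
--         if c["from_name"] == 'bbox':
--             gender_index = i
--         if c["from_name"] == 'intent':
--             intent_index = i
--         if c["from_name"] == 'tone':
--             tone_index = i
--     return gender_index, intent_index, tone_index
-- ===== SOURCE B (Python) =====
-- def json_reorder(curdata):
--     bbox_index = -1
--     intent_index = -1
--     tone_index = -1
--     for i in range(len(curdata) - 1, -1, -1):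
--         f = curdata[i]["from_name"]
--         if bbox_index == -1 and f == 'bbox':
--             bbox_index = i
--         if intent_index == -1 and f == 'intent':
--             intent_index = i
--         if tone_index == -1 and f == 'tone':
--             tone_index = i
--         if bbox_index != -1 and intent_index != -1 and tone_index != -1:
--             break
--     return bbox_index, intent_index, tone_index
-- ===== Notes on version B (the rewrite author's own statement) =====
-- stated objective: alternative
-- what changed: B scans the list backwards with first-hit-wins assignments and breaks out as soon as all three indices are found, instead of A's forward last-write-wins scan over the whole list.
import Mathlib
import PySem

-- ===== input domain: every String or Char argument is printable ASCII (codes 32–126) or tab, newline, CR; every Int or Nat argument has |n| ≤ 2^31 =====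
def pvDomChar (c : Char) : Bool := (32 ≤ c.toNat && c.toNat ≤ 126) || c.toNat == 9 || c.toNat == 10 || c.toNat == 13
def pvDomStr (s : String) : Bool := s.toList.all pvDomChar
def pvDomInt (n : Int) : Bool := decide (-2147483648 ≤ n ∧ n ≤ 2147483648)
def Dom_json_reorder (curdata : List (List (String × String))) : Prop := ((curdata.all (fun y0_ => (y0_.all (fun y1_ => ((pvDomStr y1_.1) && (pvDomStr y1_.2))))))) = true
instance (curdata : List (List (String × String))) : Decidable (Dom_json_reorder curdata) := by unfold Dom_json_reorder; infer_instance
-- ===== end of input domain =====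

-- B reverse-scans with first-hit-wins assignments and breaks once all three indices are set; equivalence of return values proved (neither program mutates its argument).

-- dict lookup c["from_name"]: first matching key (exact under Pre_, which guarantees the key exists; "" is never compared equal to the three names since Pre_ covers presence only)
def fromName (c : List (String × String)) : String :=
  ((c.find? (fun p => p.1 == "from_name")).map Prod.snd).getD ""

-- ===== PORT A =====
def json_reorder (curdata : List (List (String × String))) : Int × Int × Int :=
  (PySem.List.enumerate curdata 0).foldl
    (fun (st : Int × Int × Int) (p : Int × List (String × String)) =>
      let g := if fromName p.2 = "bbox" then p.1 else st.1
      let it := if fromName p.2 = "intent" then p.1 else st.2.1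
      let t := if fromName p.2 = "tone" then p.1 else st.2.2
      (g, it, t))
    (-1, -1, -1)

-- ===== PORT B =====
-- loop over i = fuel-1, fuel-2, …, 0 (Python: range(len-1, -1, -1) with break);
-- curdata[i] with 0 ≤ i < len is exactly List.getD
def jrLoop (curdata : List (List (String × String))) : Nat → Int × Int × Int → Int × Int × Int
  | 0, st => st
  | i + 1, st =>
    let f := fromName (curdata.getD i [])
    let b := if st.1 = -1 ∧ f = "bbox" then (i : Int) else st.1
    let it := if st.2.1 = -1 ∧ f = "intent" then (i : Int) else st.2.1
    let t := if st.2.2 = -1 ∧ f = "tone" then (i : Int) else st.2.2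
    if b ≠ -1 ∧ it ≠ -1 ∧ t ≠ -1 then (b, it, t) else jrLoop curdata i (b, it, t)

def json_reorder_alt (curdata : List (List (String × String))) : Int × Int × Int :=
  jrLoop curdata curdata.length (-1, -1, -1)

-- ===== PRECONDITION & SPEC =====
-- Pre_ excludes exactly the inputs where some element has no "from_name" key: there Python raises KeyError.
def Pre_json_reorder (curdata : List (List (String × String))) : Prop :=
  ∀ c ∈ curdata, ∃ p ∈ c, p.1 = "from_name"
instance (curdata : List (List (String × String))) : Decidable (Pre_json_reorder curdata) := by unfold Pre_json_reorder; infer_instance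

def pvWitness_json_reorder : (List (List (String × String))) :=
  [[("from_name", "tone")], [("from_name", "bbox")], [("from_name", "tone")]]

def Spec_json_reorder (curdata : List (List (String × String))) (out : Int × Int × Int) : Prop := out = json_reorder_alt curdata
instance (curdata : List (List (String × String))) (out : Int × Int × Int) : Decidable (Spec_json_reorder curdata out) := by unfold Spec_json_reorder; infer_instance

-- ===== CLAIM (what is proved, stated in full; the proofs are below) =====
def Claim_equal_json_reorder : Prop := ∀ (curdata : List (List (String × String))), Dom_json_reorder curdata → Pre_json_reorder curdata → Spec_json_reorder curdata (json_reorder curdata)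

-- ===== LEMMAS AND PROOFS =====

-- first backward hit = last forward write: combine an already-set value with the older result
def pick (a b : Int) : Int := if a = -1 then b else a

-- jrLoop only reads indices < fuel, so a longer list behaves the same
theorem jrLoop_take (l : List (List (String × String))) (n : Nat) (hn : n ≤ l.length) :
    ∀ (x : List (String × String)) (st : Int × Int × Int),
      jrLoop (l ++ [x]) n st = jrLoop l n st := by
  induction n with
  | zero => intro x st; rfl
  | succ i ih =>
    intro x st
    have hi : i < l.length := hn
    simp only [jrLoop, List.getD_append _ _ _ _ hi, ih (Nat.le_of_succ_le hn) x]

theorem jrLoop_pick (l : List (List (String × String))) :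
    ∀ st : Int × Int × Int,
      jrLoop l l.length st =
        (pick st.1 (json_reorder l).1, pick st.2.1 (json_reorder l).2.1,
          pick st.2.2 (json_reorder l).2.2) := by
  induction l using List.reverseRecOn with
  | nil =>
    intro st
    obtain ⟨a, b, c⟩ := st
    simp only [List.length_nil, jrLoop, json_reorder, PySem.List.enumerate_nil, List.foldl_nil,
      pick]
    split_ifs <;> simp_all
  | append_singleton l x ih =>
    intro st
    have hA : json_reorder (l ++ [x]) =
        ((if fromName x = "bbox" then (l.length : Int) else (json_reorder l).1),
         (if fromName x = "intent" then (l.length : Int) else (json_reorder l).2.1),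
         (if fromName x = "tone" then (l.length : Int) else (json_reorder l).2.2)) := by
      simp only [json_reorder, PySem.List.enumerate_append, List.foldl_append,
        PySem.List.enumerate_cons, PySem.List.enumerate_nil, List.foldl_cons, List.foldl_nil,
        zero_add]
    have hget : (l ++ [x]).getD l.length [] = x := by
      simp [List.getD_eq_getElem?_getD]
    have hlen : (l ++ [x]).length = l.length + 1 := by simp
    rw [hlen]
    simp only [jrLoop, hget]
    set f := fromName x with hf
    set b := if st.1 = -1 ∧ f = "bbox" then (l.length : Int) else st.1 with hb
    set it := if st.2.1 = -1 ∧ f = "intent" then (l.length : Int) else st.2.1 with hit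
    set t := if st.2.2 = -1 ∧ f = "tone" then (l.length : Int) else st.2.2 with ht
    have hn1 : (l.length : Int) ≠ -1 := by omega
    have goalEq :
        (pick b (json_reorder l).1, pick it (json_reorder l).2.1, pick t (json_reorder l).2.2)
          = (pick st.1 (json_reorder (l ++ [x])).1, pick st.2.1 (json_reorder (l ++ [x])).2.1,
             pick st.2.2 (json_reorder (l ++ [x])).2.2) := by
      rw [hA]
      refine Prod.ext ?_ (Prod.ext ?_ ?_) <;> simp only [pick, hb, hit, ht]
      · by_cases h1 : st.1 = -1 <;> by_cases h2 : f = "bbox" <;>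
          simp [h1, h2, hn1]
      · by_cases h1 : st.2.1 = -1 <;> by_cases h2 : f = "intent" <;>
          simp [h1, h2, hn1]
      · by_cases h1 : st.2.2 = -1 <;> by_cases h2 : f = "tone" <;>
          simp [h1, h2, hn1]
    by_cases hbrk : b ≠ -1 ∧ it ≠ -1 ∧ t ≠ -1
    · rw [if_pos hbrk, ← goalEq]
      obtain ⟨h1, h2, h3⟩ := hbrk
      simp [pick, h1, h2, h3]
    · rw [if_neg hbrk, jrLoop_take l l.length (le_refl _), ih, ← goalEq]

theorem json_reorder_spec : Claim_equal_json_reorder := by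
  intro curdata _ _
  show json_reorder curdata = json_reorder_alt curdata
  rw [json_reorder_alt, jrLoop_pick]
  simp [pick]
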